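-- pv_equiv track=rewrite | github.com/VaibhavReal/scrabble-game | ps3_sol.py | update_hand
-- ===== SOURCE A (Python) =====
-- def update_hand(hand, word):
--     #lets gooo success
--     new_hand = hand.copy()
--     for letter in word:
--         letter = letter.lower()
--         if letter in new_hand:
--             if  new_hand[letter] > 1:
--                 new_hand[letter] = new_hand[letter] - 1
--             else:
--                 del new_hand[letter]
--     return new_hand
--
--
--
--     pass  # TO DO... Remove this line when you implement this function
-- ===== SOURCE B (Python) =====
-- def update_hand(hand, word):
--     # Count the lowercased letters of the word once, then rebuild the hand in a
--     # single dict comprehension: keep (and subtract) only where enough remains.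
--     need = {}
--     for ch in word.lower():
--         need[ch] = need.get(ch, 0) + 1
--     return {k: v - need.get(k, 0)
--             for k, v in hand.items()
--             if k not in need or v > need[k]}
-- ===== Notes on version B (the rewrite author's own statement) =====
-- stated objective: idiomatic
-- what changed: B counts the word's lowercased letters once and then rebuilds the hand in a single dict comprehension over hand.items() (keeping a key iff it is unneeded or its count exceeds the need, subtracting the need), instead of A's per-character decrement/delete mutation loop over a copied dict.
import Mathlib
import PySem

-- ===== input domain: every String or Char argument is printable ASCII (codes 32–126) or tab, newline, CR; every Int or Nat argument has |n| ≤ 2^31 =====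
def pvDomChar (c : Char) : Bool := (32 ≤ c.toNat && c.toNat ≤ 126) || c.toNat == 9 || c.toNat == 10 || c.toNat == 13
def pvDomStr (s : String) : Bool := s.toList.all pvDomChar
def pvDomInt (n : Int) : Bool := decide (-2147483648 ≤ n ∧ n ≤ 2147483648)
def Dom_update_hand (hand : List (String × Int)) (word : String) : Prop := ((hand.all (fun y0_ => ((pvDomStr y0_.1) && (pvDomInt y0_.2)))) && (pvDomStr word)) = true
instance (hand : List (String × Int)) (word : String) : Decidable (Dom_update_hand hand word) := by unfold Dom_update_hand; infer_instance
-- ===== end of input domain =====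

-- B counts the lowercased letters of the word once and rebuilds the hand in a single
-- dict comprehension (keep and subtract only where enough remains), instead of A's
-- per-character decrement/delete mutation loop (idiomatic; return values proved equal).

-- ===== PORT A =====
def update_hand (hand : List (String × Int)) (word : String) : List (String × Int) :=
  let new_hand := PySem.Dict.ofList hand
  (word.toList.foldl (fun d ch =>
      let letter := PySem.Str.lower (String.ofList [ch])
      if d.contains letter then
        if d.getD letter 0 > 1 then d.insert letter (d.getD letter 0 - 1)
        else d.erase letter
      else d) new_hand).items

-- ===== PORT B =====
def update_hand_alt (hand : List (String × Int)) (word : String) : List (String × Int) :=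
  let need := (PySem.Str.lower word).toList.foldl (fun d ch =>
      let c := String.ofList [ch]
      d.insert c (d.getD c 0 + 1)) (PySem.Dict.empty : PySem.Dict String Int)
  (PySem.Dict.ofList hand).items.filterMap (fun p =>
    if !need.contains p.1 || p.2 > need.getD p.1 0 then
      some (p.1, p.2 - need.getD p.1 0)
    else none)

-- ===== PRECONDITION & SPEC =====
def Spec_update_hand (hand : List (String × Int)) (word : String) (out : List (String × Int)) : Prop := out = update_hand_alt hand word
instance (hand : List (String × Int)) (word : String) (out : List (String × Int)) : Decidable (Spec_update_hand hand word out) := by unfold Spec_update_hand; infer_instance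

-- ===== CLAIM =====
def Claim_equal_update_hand : Prop := ∀ (hand : List (String × Int)) (word : String), Dom_update_hand hand word → Spec_update_hand hand word (update_hand hand word)

-- ===== LEMMAS AND PROOFS =====

def pvStep (d : PySem.Dict String Int) (k : String) (n : Int) : PySem.Dict String Int :=
  if d.contains k then
    if d.getD k 0 > n then d.insert k (d.getD k 0 - n) else d.erase k
  else d
def pvGP (k : String) (n : Int) (p : String × Int) : Option (String × Int) :=
  if p.1 = k then (if p.2 > n then some (k, p.2 - n) else none) else some p
def pvG (ls : List String) (p : String × Int) : Option (String × Int) :=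
  if ls.count p.1 = 0 then some p
  else if p.2 > (ls.count p.1 : Int) then some (p.1, p.2 - ls.count p.1) else none

theorem pvStep_items (d : PySem.Dict String Int) (k : String) (n : Int)
    (h : d.keys.Nodup) : (pvStep d k n).items = d.items.filterMap (pvGP k n) := by
  unfold pvStep
  by_cases hc : d.contains k = true
  · have hkey : ∀ p ∈ d.items, p.1 = k → p.2 = d.getD k 0 := by
      intro p hp hpk
      have := PySem.Dict.getD_of_mem_items (d := d) (k := p.1) (v := p.2) hp h 0
      rw [hpk] at this; exact this.symm
    by_cases hv : d.getD k 0 > n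
    · simp only [hc, if_true, hv]
      rw [PySem.Dict.items_insert_of_contains d _ hc]
      rw [← List.filterMap_eq_map (f := fun p : String × Int => if (p.1 == k) = true then (k, d.getD k 0 - n) else p)]
      apply List.filterMap_congr
      intro p hp
      by_cases hpk : p.1 = k
      · have := hkey p hp hpk
        simp [pvGP, hpk, this, hv, Function.comp]
      · simp [pvGP, hpk, Function.comp]
    · simp only [hc, if_true, hv, if_false]
      show (d.items.filter fun p => !p.1 == k) = _
      rw [← List.filterMap_eq_filter (p := fun p : String × Int => !p.1 == k)]
      apply List.filterMap_congr
      intro p hp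
      by_cases hpk : p.1 = k
      · have := hkey p hp hpk
        simp [pvGP, hpk, Option.guard, this]
        omega
      · simp [pvGP, hpk, Option.guard]
  · rw [Bool.not_eq_true] at hc
    rw [if_neg (by simp [hc])]
    have hno : ∀ p ∈ d.items, ¬(p.1 = k) := by
      intro p hp hpk
      have : d.contains k = true := by
        unfold PySem.Dict.contains
        rw [List.any_eq_true]
        exact ⟨p, hp, by simp [hpk]⟩
      rw [this] at hc
      simp at hc
    conv_lhs => rw [← List.filterMap_some (l := d.items)]
    symm
    apply List.filterMap_congr
    intro p hp
    simp [pvGP, hno p hp]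

theorem pvStep_nodup (d : PySem.Dict String Int) (k : String) (n : Int)
    (h : d.keys.Nodup) : (pvStep d k n).keys.Nodup := by
  unfold pvStep
  split_ifs with h1 h2
  · exact PySem.Dict.nodup_keys_insert d k _ h
  · show ((d.items.filter _).map Prod.fst).Nodup
    exact h.sublist (List.Sublist.map _ List.filter_sublist)
  · exact h

theorem pvGP_bind_G (c : String) (ls : List String) (p : String × Int) :
    (pvGP c 1 p).bind (pvG ls) = pvG (c :: ls) p := by
  unfold pvGP pvG
  by_cases hpk : p.1 = c
  · subst hpk
    rw [if_pos rfl, List.count_cons_self]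
    by_cases h1 : p.2 > 1
    · rw [if_pos h1, Option.bind_some]
      dsimp only
      by_cases h0 : ls.count p.1 = 0
      · rw [if_pos h0, if_neg (by omega : ¬(ls.count p.1 + 1 = 0)),
            if_pos (by rw [h0]; push_cast; omega)]
        rw [h0]; norm_num
      · rw [if_neg h0, if_neg (by omega : ¬(ls.count p.1 + 1 = 0))]
        by_cases h2 : p.2 - 1 > (ls.count p.1 : Int)
        · rw [if_pos h2, if_pos (by push_cast; omega)]
          exact congrArg some (by simp only [Prod.mk.injEq, true_and]; push_cast; ring)
        · rw [if_neg h2, if_neg (by push_cast; omega)]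
    · rw [if_neg h1, Option.bind_none, if_neg (by omega : ¬(ls.count p.1 + 1 = 0)),
          if_neg (by push_cast; omega)]
  · have hcnt : (c :: ls).count p.1 = ls.count p.1 := by
      simp [Ne.symm hpk]
    rw [if_neg hpk, Option.bind_some, hcnt]

theorem pvFoldA (ls : List String) (d : PySem.Dict String Int) (h : d.keys.Nodup) :
    (ls.foldl (fun d s => pvStep d s 1) d).items = d.items.filterMap (pvG ls) := by
  induction ls generalizing d with
  | nil =>
    simp only [List.foldl_nil]
    conv_lhs => rw [← List.filterMap_some (l := d.items)]
    apply List.filterMap_congr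
    intro p _
    simp [pvG]
  | cons c ls ih =>
    rw [List.foldl_cons, ih _ (pvStep_nodup d c 1 h), pvStep_items d c 1 h,
        List.filterMap_filterMap]
    apply List.filterMap_congr
    intro p _
    exact pvGP_bind_G c ls p

theorem pvCounter_G (ls : List String) (p : String × Int) :
    (if !(PySem.Dict.counter ls).contains p.1 || p.2 > (PySem.Dict.counter ls).getD p.1 0 then
        some (p.1, p.2 - (PySem.Dict.counter ls).getD p.1 0)
      else none) = pvG ls p := by
  have hgd : (PySem.Dict.counter ls).getD p.1 0 = (ls.count p.1 : Int) :=
    PySem.Dict.getD_counter ls p.1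
  unfold pvG
  by_cases h0 : ls.count p.1 = 0
  · have hnc : (PySem.Dict.counter ls).contains p.1 = false := by
      rw [PySem.Dict.contains_counter]
      simp [List.count_eq_zero.mp h0]
    simp [hnc, hgd, h0]
  · have hc : (PySem.Dict.counter ls).contains p.1 = true := by
      rw [PySem.Dict.contains_counter]
      simp [List.count_pos_iff.mp (Nat.pos_of_ne_zero h0)]
    by_cases h2 : p.2 > (ls.count p.1 : Int)
    · simp [hc, hgd, h0, h2]
    · simp [hc, hgd, h0, h2]

theorem pvLower_single (ch : Char) :
    PySem.Str.lower (String.ofList [ch]) = String.ofList [PySem.Chars.lowerChar ch] := by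
  apply String.ext
  simp [PySem.Str.toList_lower, PySem.Chars.lower]

-- ===== VERDICT =====
theorem update_hand_spec : Claim_equal_update_hand := by
  intro hand word _
  unfold Spec_update_hand update_hand update_hand_alt
  dsimp only
  have h1 : ∀ (d : PySem.Dict String Int) (l : List Char),
      l.foldl (fun d ch =>
        let letter := PySem.Str.lower (String.ofList [ch])
        if d.contains letter then
          if d.getD letter 0 > 1 then d.insert letter (d.getD letter 0 - 1)
          else d.erase letter
        else d) d
      = (l.map (fun ch => PySem.Str.lower (String.ofList [ch]))).foldl (fun d s => pvStep d s 1) d := by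
    intro d l
    rw [List.foldl_map]
    rfl
  have h2 : (PySem.Str.lower word).toList.foldl (fun d ch =>
        let c := String.ofList [ch]
        d.insert c (d.getD c 0 + 1)) (PySem.Dict.empty : PySem.Dict String Int)
      = PySem.Dict.counter ((PySem.Str.lower word).toList.map (fun ch => String.ofList [ch])) := by
    rw [← PySem.Dict.foldl_insert_getD_add_one_eq_counter, List.foldl_map]
  have hls : (PySem.Str.lower word).toList.map (fun ch => String.ofList [ch])
      = word.toList.map (fun ch => PySem.Str.lower (String.ofList [ch])) := by
    rw [PySem.Str.toList_lower]
    unfold PySem.Chars.lower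
    rw [List.map_map]
    apply List.map_congr_left
    intro ch _
    exact (pvLower_single ch).symm
  rw [h1, h2, hls]
  set ls := word.toList.map (fun ch => PySem.Str.lower (String.ofList [ch])) with hls'
  rw [pvFoldA ls _ (PySem.Dict.nodup_keys_ofList hand)]
  symm
  apply List.filterMap_congr
  intro p _
  exact pvCounter_G ls p
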